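-- pv_equiv track=rewrite | github.com/Friedrichqi/MCFP_MoA | proxy_server.py | build_hierarchical_sets
-- ===== SOURCE A (Python) =====
-- from typing import Any, Dict, List, Optional, Set, Tuple
--
-- def build_hierarchical_sets(gpu_ids: List[int]) -> List[Tuple[int, ...]]:
--     """Hierarchical sets: TP 1/2/4/8/... aligned by index."""
--     sets: Set[Tuple[int, ...]] = set((gid,) for gid in gpu_ids)
--     n, size = len(gpu_ids), 2
--     while size <= n:
--         for start in range(0, n, size):
--             chunk = gpu_ids[start : start + size]
--             if len(chunk) == size:
--                 sets.add(tuple(chunk))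
--         size *= 2
--     return sorted(sets, key=lambda s: (len(s), s))
-- ===== SOURCE B (Python) =====
-- from typing import List, Tuple
--
-- def build_hierarchical_sets(gpu_ids: List[int]) -> List[Tuple[int, ...]]:
--     """Bottom-up: merge consecutive pairs of the previous level's tuples."""
--     level = [(gid,) for gid in gpu_ids]
--     sets = set(level)
--     while len(level) >= 2:
--         nxt = [level[2 * i] + level[2 * i + 1] for i in range(len(level) // 2)]
--         sets.update(nxt)
--         level = nxt
--     return sorted(sets, key=lambda s: (len(s), s))
-- ===== Notes on version B (the rewrite author's own statement) =====
-- stated objective: alternative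
-- what changed: B builds the hierarchy bottom-up by concatenating consecutive pairs of the previous level's tuples, instead of re-slicing gpu_ids at every power-of-two size as A does.
import Mathlib
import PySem

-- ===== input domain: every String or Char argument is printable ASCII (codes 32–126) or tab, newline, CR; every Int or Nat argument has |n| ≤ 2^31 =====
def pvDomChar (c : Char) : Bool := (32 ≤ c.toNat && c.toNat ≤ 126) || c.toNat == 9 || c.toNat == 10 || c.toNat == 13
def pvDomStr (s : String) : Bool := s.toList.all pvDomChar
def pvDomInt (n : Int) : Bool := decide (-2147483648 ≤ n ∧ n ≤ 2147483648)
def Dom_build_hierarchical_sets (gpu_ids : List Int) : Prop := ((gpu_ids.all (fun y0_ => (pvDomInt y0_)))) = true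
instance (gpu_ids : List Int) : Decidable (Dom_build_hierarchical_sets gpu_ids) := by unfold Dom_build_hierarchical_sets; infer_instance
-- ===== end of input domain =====

-- B builds the hierarchy bottom-up by concatenating consecutive pairs of the previous
-- level's tuples instead of re-slicing gpu_ids at every size (alternative decomposition).

-- ===== PORT A =====
-- inner 'for start in range(0, n, size)' loop of A
def buildA_inner (xs : List Int) (size : Nat) (acc : PySem.Set (List Int)) : PySem.Set (List Int) :=
  (PySem.List.pyRange 0 xs.length (size : Int)).foldl
    (fun a start =>
      let chunk := PySem.List.slice xs (some start) (some (start + (size : Int)))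
      if chunk.length = size then PySem.Set.add a chunk else a) acc

-- 'while size <= n: … ; size *= 2' (the '1 ≤ size' conjunct is only a termination guard;
-- A always starts at size = 2)
def buildA_loop (xs : List Int) (acc : PySem.Set (List Int)) (size : Nat) : PySem.Set (List Int) :=
  if _h : 1 ≤ size ∧ size ≤ xs.length then
    buildA_loop xs (buildA_inner xs size acc) (2 * size)
  else acc
termination_by xs.length + 1 - size
decreasing_by omega

def build_hierarchical_sets (gpu_ids : List Int) : List (List Int) :=
  PySem.List.sorted2 (buildA_loop gpu_ids (PySem.Set.ofList (gpu_ids.map (fun g => [g]))) 2)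
    (fun s => (s.length : Int)) (fun s => s)

-- ===== PORT B =====
-- 'nxt = [level[2*i] + level[2*i+1] for i in range(len(level)//2)]'
def pairLevel (level : List (List Int)) : List (List Int) :=
  (List.range (level.length / 2)).map
    (fun i => PySem.List.pyGetD level (2 * i : Nat) [] ++ PySem.List.pyGetD level (2 * i + 1 : Nat) [])

-- 'while len(level) >= 2: nxt = …; sets.update(nxt); level = nxt'
def buildB_loop (acc : PySem.Set (List Int)) (level : List (List Int)) : PySem.Set (List Int) :=
  if _h : 2 ≤ level.length then
    buildB_loop ((pairLevel level).foldl PySem.Set.add acc) (pairLevel level)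
  else acc
termination_by level.length
decreasing_by simp [pairLevel]; omega

def build_hierarchical_sets_alt (gpu_ids : List Int) : List (List Int) :=
  let level := gpu_ids.map (fun g => [g])
  PySem.List.sorted2 (buildB_loop (PySem.Set.ofList level) level)
    (fun s => (s.length : Int)) (fun s => s)

-- ===== PRECONDITION & SPEC =====
def Spec_build_hierarchical_sets (gpu_ids : List Int) (out : List (List Int)) : Prop := out = build_hierarchical_sets_alt gpu_ids
instance (gpu_ids : List Int) (out : List (List Int)) : Decidable (Spec_build_hierarchical_sets gpu_ids out) := by unfold Spec_build_hierarchical_sets; infer_instance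

-- ===== CLAIM (what is proved, stated in full; the proofs are below) =====
def Claim_equal_build_hierarchical_sets : Prop := ∀ (gpu_ids : List Int), Dom_build_hierarchical_sets gpu_ids → Spec_build_hierarchical_sets gpu_ids (build_hierarchical_sets gpu_ids)

-- ===== LEMMAS AND PROOFS =====

-- the aligned full chunks of size s, in A's scan order
def pvChunks (xs : List Int) (s : Nat) : List (List Int) :=
  (List.range (xs.length / s)).map (fun j => (xs.drop (j * s)).take s)

lemma length_pvChunks (xs : List Int) (s : Nat) : (pvChunks xs s).length = xs.length / s := by
  simp [pvChunks]

lemma pvChunks_one (xs : List Int) : pvChunks xs 1 = xs.map (fun g => [g]) := by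
  apply List.ext_getElem
  · simp [pvChunks]
  · intro j h1 h2
    simp only [pvChunks, Nat.div_one, List.getElem_map, List.getElem_range, Nat.mul_one]
    rw [List.drop_eq_getElem_cons (by simpa using h2)]
    rfl

lemma pairLevel_pvChunks (xs : List Int) (s : Nat) (hs : 1 ≤ s) :
    pairLevel (pvChunks xs s) = pvChunks xs (2 * s) := by
  unfold pairLevel
  rw [length_pvChunks]
  have hdiv : xs.length / s / 2 = xs.length / (2 * s) := by
    rw [Nat.div_div_eq_div_mul, Nat.mul_comm]
  rw [hdiv]
  unfold pvChunks
  apply List.map_congr_left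
  intro i hi
  simp only [List.mem_range] at hi
  have h2i : 2 * i + 1 < xs.length / s := by
    have hi' : (i + 1) * (2 * s) ≤ xs.length :=
      le_trans (Nat.mul_le_mul_right _ (Nat.lt_iff_add_one_le.mp hi)) (Nat.div_mul_le_self _ _)
    have hB : (2 * i + 2) * s ≤ xs.length := by nlinarith
    have hC := (Nat.le_div_iff_mul_le (by omega : 0 < s)).2 hB
    omega
  have g1 : PySem.List.pyGetD ((List.range (xs.length / s)).map (fun j => (xs.drop (j * s)).take s)) ((2 * i : Nat) : Int) [] = (xs.drop (2 * i * s)).take s := by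
    rw [PySem.List.pyGetD_natCast, List.getD_eq_getElem?_getD,
      List.getElem?_map, List.getElem?_range (by omega : 2 * i < xs.length / s)]
    rfl
  have g2 : PySem.List.pyGetD ((List.range (xs.length / s)).map (fun j => (xs.drop (j * s)).take s)) ((2 * i + 1 : Nat) : Int) [] = (xs.drop ((2 * i + 1) * s)).take s := by
    rw [PySem.List.pyGetD_natCast, List.getD_eq_getElem?_getD,
      List.getElem?_map, List.getElem?_range (by omega : 2 * i + 1 < xs.length / s)]
    rfl
  rw [g1, g2]
  have : (xs.drop (i * (2 * s))).take (2 * s) = (xs.drop (i * (2 * s))).take (s + s) := by ring_nf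
  rw [this, List.take_add, List.drop_drop]
  congr 2 <;> ring_nf

lemma buildA_inner_eq (xs : List Int) (size : Nat) (hs : 1 ≤ size) (acc : PySem.Set (List Int)) :
    buildA_inner xs size acc = (pvChunks xs size).foldl PySem.Set.add acc := by
  unfold buildA_inner
  rw [PySem.List.pyRange_of_pos 0 (xs.length : Int) (by exact_mod_cast hs)]
  rw [List.foldl_map]
  set n := xs.length with hn
  by_cases h0 : (0 : Int) < (n : Int)
  · simp only [if_pos h0]
    have hcount : (((n : Int) - 0 + (size : Int) - 1) / (size : Int)).toNat = (n + size - 1) / size := by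
      have h1 : ((n : Int) - 0 + (size : Int) - 1) = ((n + size - 1 : Nat) : Int) := by omega
      rw [h1, ← Int.natCast_div, Int.toNat_natCast]
    rw [hcount]
    have hchunk : ∀ (a : PySem.Set (List Int)) (k : Nat),
        (if (PySem.List.slice xs (some (0 + (size : Int) * (k : Nat))) (some (0 + (size : Int) * (k : Nat) + (size : Int)))).length = size
          then PySem.Set.add a (PySem.List.slice xs (some (0 + (size : Int) * (k : Nat))) (some (0 + (size : Int) * (k : Nat) + (size : Int))))
          else a) =
        (if k < n / size then PySem.Set.add a ((xs.drop (k * size)).take size) else a) := by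
      intro a k
      have hcast : (0 : Int) + (size : Int) * (k : Nat) = ((k * size : Nat) : Int) := by push_cast; ring
      simp only [hcast]
      have hsl : PySem.List.slice xs (some ((k * size : Nat) : Int)) (some (((k * size : Nat) : Int) + (size : Int))) = (xs.drop (k * size)).take size := by
        exact_mod_cast PySem.List.slice_natCast_add xs (k * size) size
      simp only [hsl]
      have hlen : ((xs.drop (k * size)).take size).length = min size (n - k * size) := by
        simp [hn]
      by_cases hk : k < n / size
      · have h5 : (k + 1) * size ≤ n :=
          le_trans (Nat.mul_le_mul_right _ (by omega)) (Nat.div_mul_le_self n size)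
        have h6 : k * size + size ≤ n := by rw [Nat.add_mul, Nat.one_mul] at h5; exact h5
        rw [if_pos (by rw [hlen]; exact Nat.min_eq_left (by omega)), if_pos hk]
      · have h7 : ¬ (k * size + size ≤ n) := by
          intro hc
          have h8 : (k + 1) * size ≤ n := by rw [Nat.add_mul, Nat.one_mul]; exact hc
          have := (Nat.le_div_iff_mul_le (by omega : 0 < size)).2 h8
          omega
        rw [if_neg (by rw [hlen, Nat.min_def]; split_ifs <;> omega), if_neg hk]
    rw [PySem.List.foldl_congr_mem _ _
      (fun a k => if k < n / size then PySem.Set.add a ((xs.drop (k * size)).take size) else a) _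
      (fun a k _ => hchunk a k)]
    have hsplit : (n + size - 1) / size = n / size + ((n + size - 1) / size - n / size) := by
      have : n / size ≤ (n + size - 1) / size := Nat.div_le_div_right (by omega)
      omega
    rw [hsplit, List.range_add, List.foldl_append]
    have hfirst : (List.range (n / size)).foldl
        (fun a k => if k < n / size then PySem.Set.add a ((xs.drop (k * size)).take size) else a) acc =
        (pvChunks xs size).foldl PySem.Set.add acc := by
      rw [PySem.List.foldl_congr_mem _ _
        (fun a k => PySem.Set.add a ((xs.drop (k * size)).take size)) _
        (by intro a k hk; simp only [List.mem_range] at hk; rw [if_pos hk])]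
      unfold pvChunks
      rw [List.foldl_map]
    rw [hfirst]
    rw [PySem.List.foldl_congr_mem _ _ (fun a _ => a) _
      (by intro a k hk
          simp only [List.mem_map, List.mem_range] at hk
          obtain ⟨m, _, hm⟩ := hk
          rw [if_neg (by omega)])]
    exact List.foldl_fixed' (fun _ => rfl) _
  · have hn0 : xs.length = 0 := by omega
    simp only [if_neg h0]
    simp [pvChunks, hn0]

lemma bridge (xs : List Int) :
    ∀ (d s : Nat), 1 ≤ s → xs.length + 1 - s ≤ d → ∀ acc,
      buildB_loop acc (pvChunks xs s) = buildA_loop xs acc (2 * s) := by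
  intro d
  induction d with
  | zero =>
    intro s hs hd acc
    have hsn : xs.length < s := by omega
    rw [buildB_loop, buildA_loop]
    rw [dif_neg (by rw [length_pvChunks]; have : xs.length / s = 0 := Nat.div_eq_of_lt hsn; omega)]
    rw [dif_neg (by omega)]
  | succ d ih =>
    intro s hs hd acc
    rw [buildB_loop, buildA_loop]
    by_cases hc : 2 * s ≤ xs.length
    · have hlev : 2 ≤ (pvChunks xs s).length := by
        rw [length_pvChunks]
        exact (Nat.le_div_iff_mul_le (by omega)).2 (by omega)
      rw [dif_pos hlev, dif_pos ⟨by omega, hc⟩]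
      rw [pairLevel_pvChunks xs s hs]
      rw [buildA_inner_eq xs (2 * s) (by omega)]
      have := ih (2 * s) (by omega) (by omega) ((pvChunks xs (2 * s)).foldl PySem.Set.add acc)
      rw [this]
    · have hlev : ¬ 2 ≤ (pvChunks xs s).length := by
        rw [length_pvChunks]
        intro h
        exact hc ((Nat.le_div_iff_mul_le (by omega)).1 h)
      rw [dif_neg hlev, dif_neg (by omega)]

-- ===== VERDICT (by name: the statement is the Claim_ definition above) =====
theorem build_hierarchical_sets_spec : Claim_equal_build_hierarchical_sets := by
  intro xs _
  unfold Spec_build_hierarchical_sets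
  simp only [build_hierarchical_sets, build_hierarchical_sets_alt, ← pvChunks_one]
  have hb := bridge xs (xs.length + 1) 1 (by omega) (by omega)
      (PySem.Set.ofList (pvChunks xs 1))
  norm_num at hb
  rw [hb]
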